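-- pv_equiv track=rewrite | github.com/pechdaniel/MyProjects | MyProjects/FP/FP/Assignment 1/proj1.py | mountainL
-- ===== SOURCE A (Python) =====
-- def mountainL(myList):
--     '''
--
--     int: param myList (list)
--     out: True if myList is a mountain formation
--     '''
--     n=len(myList)
--     i=1
--     ok=1
--     while i<n:
--         if ok==1 and myList[i]<myList[i-1]:
--             if i==1:
--                 return False
--             else:
--                 ok=0
--         if ok==0 and myList[i]>myList[i-1]:
--             return False
--         i=i+1
--     if ok==1:
--         return False
--     return True
-- ===== SOURCE B (Python) =====
-- def mountainL(myList):
--     n = len(myList)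
--     i = 0
--     while i + 1 < n and myList[i] <= myList[i + 1]:
--         i += 1
--     if i == 0 or i == n - 1:
--         return False
--     while i + 1 < n and myList[i] >= myList[i + 1]:
--         i += 1
--     return i == n - 1
-- ===== Notes on version B (the rewrite author's own statement) =====
-- stated objective: simpler
-- what changed: Replaces A's single index-based scan with an ok-flag state machine by a two-phase two-pointer walk: climb while non-decreasing, reject a peak at position 0 or n-1, then walk down while non-increasing.
import Mathlib
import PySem

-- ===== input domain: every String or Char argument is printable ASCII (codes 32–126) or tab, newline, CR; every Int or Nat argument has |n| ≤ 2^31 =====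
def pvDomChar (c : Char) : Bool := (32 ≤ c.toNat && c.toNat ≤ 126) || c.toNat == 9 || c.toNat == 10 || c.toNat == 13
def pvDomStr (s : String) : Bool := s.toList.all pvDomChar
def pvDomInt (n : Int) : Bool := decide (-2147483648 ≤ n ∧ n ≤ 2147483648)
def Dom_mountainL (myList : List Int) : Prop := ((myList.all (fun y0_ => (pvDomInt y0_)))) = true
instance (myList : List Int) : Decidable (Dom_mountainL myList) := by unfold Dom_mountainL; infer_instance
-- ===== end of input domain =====

-- B replaces A's single stateful scan (index + ok flag) by a two-phase walk-up/walk-down; objective: simpler.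


-- ===== PORT A =====
-- A's while loop reads myList[i] and myList[i-1]; its obvious structural recursion
-- carries the previous element `prev`, the index `i` (only ever compared to 1) and the
-- flag `ok`, walking the remaining list. Inside the first branch x < prev, so the
-- second `if ok==0 and myList[i]>myList[i-1]` of the same iteration is vacuously false
-- and the loop just advances with ok = 0.
def mountainLGo (prev i ok : Int) (rest : List Int) : Bool :=
  match rest with
  | [] => if ok = 1 then false else true
  | x :: rs =>
    if ok = 1 ∧ x < prev then
      if i = 1 then false
      else mountainLGo x (i + 1) 0 rs
    else if ok = 0 ∧ x > prev then false
    else mountainLGo x (i + 1) ok rs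

def mountainL (myList : List Int) : Bool :=
  match myList with
  | [] => false            -- loop does not run, ok == 1 → False
  | x :: rest => mountainLGo x 1 1 rest

-- ===== PORT B =====
-- first while loop of Source B: climb while prev ≤ next, returning the peak and the rest
def mountainClimb (x : Int) (rest : List Int) : Int × List Int :=
  match rest with
  | [] => (x, [])
  | y :: ys => if x ≤ y then mountainClimb y ys else (x, y :: ys)

-- second while loop of Source B: walk down while prev ≥ next; True iff the end is reached
def mountainDescend (x : Int) (rest : List Int) : Bool :=
  match rest with
  | [] => true
  | y :: ys => if x ≥ y then mountainDescend y ys else false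

def mountainL_alt (myList : List Int) : Bool :=
  match myList with
  | [] => false                    -- i == 0
  | x :: rest =>
    match rest with
    | [] => false                  -- i == 0 = n - 1
    | y :: ys =>
      if x ≤ y then
        let pr := mountainClimb y ys
        match pr.2 with
        | [] => false              -- i == n - 1: never descended
        | _ :: _ => mountainDescend pr.1 pr.2
      else false                   -- i == 0: immediate strict decrease

-- ===== PRECONDITION & SPEC =====
def Spec_mountainL (myList : List Int) (out : Bool) : Prop := out = mountainL_alt myList
instance (myList : List Int) (out : Bool) : Decidable (Spec_mountainL myList out) := by unfold Spec_mountainL; infer_instance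

-- ===== CLAIM (what is proved, stated in full; the proofs are below) =====
def Claim_equal_mountainL : Prop := ∀ (myList : List Int), Dom_mountainL myList → Spec_mountainL myList (mountainL myList)

-- ===== LEMMAS AND PROOFS =====

-- descent phase: once ok = 0, A's loop is exactly B's walk-down
theorem mountainLGo_descend (rest : List Int) : ∀ (prev i : Int),
    mountainLGo prev i 0 rest = mountainDescend prev rest := by
  induction rest with
  | nil => intro prev i; rfl
  | cons x rs ih =>
    intro prev i
    simp only [mountainLGo, mountainDescend]
    by_cases h : x > prev
    · simp [h, not_le.mpr h]
    · simp [show prev ≥ x by omega, show ¬ (x > prev) by omega, ih]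

-- ascent phase: for i ≥ 2, A's loop with ok = 1 is B's climb followed by the peak test and walk-down
theorem mountainLGo_climb (rest : List Int) : ∀ (prev i : Int), 2 ≤ i →
    mountainLGo prev i 1 rest =
      (match (mountainClimb prev rest).2 with
       | [] => false
       | _ :: _ => mountainDescend (mountainClimb prev rest).1 (mountainClimb prev rest).2) := by
  induction rest with
  | nil => intro prev i _; rfl
  | cons x rs ih =>
    intro prev i hi
    by_cases h : x < prev
    · simp only [mountainLGo, mountainClimb]
      simp [h, show ¬ (i = 1) by omega, not_le.mpr h, mountainLGo_descend,
            mountainDescend, show prev ≥ x by omega]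
    · simp only [mountainLGo, mountainClimb]
      simp [h, show prev ≤ x by omega, ih x (i + 1) (by omega)]

-- ===== VERDICT (by name: the statement is the Claim_ definition above) =====
theorem mountainL_spec : Claim_equal_mountainL := by
  intro myList _
  unfold Spec_mountainL
  match myList with
  | [] => rfl
  | [x] => rfl
  | x :: y :: ys =>
    by_cases h : x ≤ y
    · simp only [mountainL, mountainL_alt, mountainLGo]
      simp [h, show ¬ (y < x) by omega, mountainLGo_climb ys y 2 (by omega)]
    · simp only [mountainL, mountainL_alt, mountainLGo]
      simp [show y < x by omega, h]
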